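-- pv_equiv track=rewrite | github.com/vchu1999/KeyValuePairExtraction | TableKVExtractionCode/table_cell_extraction.py | find_box_rows
-- ===== SOURCE A (Python) =====
-- def horizontal_overlap(b1, b2):
--     """
--     Checks if there is vertical overlap between two bounding boxes
--     :param b1: (x, y, width, height) of the first box
--     :param b2: (x, y, width, height) of the second box
--     :return: boolean if the two boxes overlap vertically
--     """
--     x1, width1 = b1[0], b1[2]
--     x2, width2 = b2[0], b2[2]
--
--     if x2 <= x1 <= x2 + width2 or x2 <= x1 + width1 <= x2 + width2:
--         return True
--
--     return False
--
-- def find_box_rows(boxes):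
--     """
--     Gets rows of bounding boxes
--     Not used for arrow data but can be useful
--     :param boxes: list of bounding boxes in (x, y, width, height) format
--     :return: list of lists of rows of bounding boxes
--     """
--     # TODO: fix with BFS
--     out = []
--     for box in boxes:
--         found = False
--         for level in out:
--             if horizontal_overlap(box, level[0]):
--                 level.append(box)
--                 found = True
--
--         if not found:
--             out.append([box])
--
--     return out
-- ===== SOURCE B (Python) =====
-- def find_box_rows(boxes):
--     """Two-pass rewrite: first select the row representatives (a box starts a
--     new row iff it overlaps no earlier representative), then build each row by
--     filtering the boxes that come after its representative."""
--     def overlaps(b, rep):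
--         x1, w1 = b[0], b[2]
--         x2, w2 = rep[0], rep[2]
--         return x2 <= x1 <= x2 + w2 or x2 <= x1 + w1 <= x2 + w2
--
--     reps = []
--     for i, b in enumerate(boxes):
--         if not any(overlaps(b, rb) for _, rb in reps):
--             reps.append((i, b))
--
--     return [[rb] + [c for c in boxes[i + 1:] if overlaps(c, rb)]
--             for i, rb in reps]
-- ===== Notes on version B (the rewrite author's own statement) =====
-- stated objective: alternative
-- what changed: Replaces A's single pass that grows rows while scanning all existing rows per box by a two-pass scheme: first select the row representatives, then build each row independently by filtering the boxes occurring after its representative.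
import Mathlib
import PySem

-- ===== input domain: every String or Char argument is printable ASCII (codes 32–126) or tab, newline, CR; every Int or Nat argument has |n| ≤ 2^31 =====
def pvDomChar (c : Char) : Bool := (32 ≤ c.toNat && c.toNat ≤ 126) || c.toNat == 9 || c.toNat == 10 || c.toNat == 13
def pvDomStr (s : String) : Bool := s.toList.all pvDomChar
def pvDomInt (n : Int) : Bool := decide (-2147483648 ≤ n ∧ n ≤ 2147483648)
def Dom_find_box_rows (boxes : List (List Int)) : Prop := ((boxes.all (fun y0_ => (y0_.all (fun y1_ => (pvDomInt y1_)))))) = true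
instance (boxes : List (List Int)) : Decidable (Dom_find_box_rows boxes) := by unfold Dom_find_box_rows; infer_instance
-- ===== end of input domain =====

-- B is an equal-cost two-pass reformulation (representatives first, then rows); return value only, A mutates no argument.

-- ===== PORT A =====
def horizontal_overlap (b1 b2 : List Int) : Bool :=
  let x1 := (PySem.List.pyGet? b1 0).getD 0
  let w1 := (PySem.List.pyGet? b1 2).getD 0
  let x2 := (PySem.List.pyGet? b2 0).getD 0
  let w2 := (PySem.List.pyGet? b2 2).getD 0
  if (x2 ≤ x1 ∧ x1 ≤ x2 + w2) ∨ (x2 ≤ x1 + w1 ∧ x1 + w1 ≤ x2 + w2) then true else false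

def find_box_rows (boxes : List (List Int)) : List (List (List Int)) :=
  boxes.foldl (fun out box =>
    let r := out.foldl (fun (acc : List (List (List Int)) × Bool) level =>
        if horizontal_overlap box (level.headD []) then (acc.1 ++ [level ++ [box]], true)
        else (acc.1 ++ [level], acc.2)) ([], false)
    if r.2 then r.1 else r.1 ++ [[box]]) []

-- ===== PORT B =====
def altOverlaps (b rep : List Int) : Bool :=
  let x1 := b.getD 0 0; let w1 := b.getD 2 0
  let x2 := rep.getD 0 0; let w2 := rep.getD 2 0
  decide ((x2 ≤ x1 ∧ x1 ≤ x2 + w2) ∨ (x2 ≤ x1 + w1 ∧ x1 + w1 ≤ x2 + w2))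

def altReps (boxes : List (List Int)) : List (Nat × List Int) :=
  boxes.zipIdx.foldl (fun reps p =>
    if reps.any (fun q => altOverlaps p.1 q.2) then reps else reps ++ [(p.2, p.1)]) []

def altRow (boxes : List (List Int)) (p : Nat × List Int) : List (List Int) :=
  p.2 :: (boxes.drop (p.1 + 1)).filter (fun c => altOverlaps c p.2)

def find_box_rows_alt (boxes : List (List Int)) : List (List (List Int)) :=
  (altReps boxes).map (altRow boxes)

-- ===== PRECONDITION & SPEC =====
-- Pre_ excludes inputs with ≥ 2 boxes of which some box has fewer than 3 coordinates: there A raises IndexError (b[0]/b[2] in the overlap test); with ≤ 1 box no overlap is ever evaluated and A returns.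
def Pre_find_box_rows (boxes : List (List Int)) : Prop := boxes.length ≤ 1 ∨ ∀ b ∈ boxes, 3 ≤ b.length
instance (boxes : List (List Int)) : Decidable (Pre_find_box_rows boxes) := by unfold Pre_find_box_rows; infer_instance
def pvWitness_find_box_rows : List (List Int) := [[0, 0, 4, 2], [2, 5, 4, 2], [10, 0, 3, 2]]

def Spec_find_box_rows (boxes : List (List Int)) (out : List (List (List Int))) : Prop := out = find_box_rows_alt boxes
instance (boxes : List (List Int)) (out : List (List (List Int))) : Decidable (Spec_find_box_rows boxes out) := by unfold Spec_find_box_rows; infer_instance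

-- ===== CLAIM (what is proved, stated in full; the proofs are below) =====
def Claim_equal_find_box_rows : Prop := ∀ (boxes : List (List Int)), Dom_find_box_rows boxes → Pre_find_box_rows boxes → Spec_find_box_rows boxes (find_box_rows boxes)

-- ===== LEMMAS AND PROOFS =====

-- with three coordinates present, A's raising getter agrees with B's getD getter
theorem overlap_eq (b1 b2 : List Int) (h1 : 3 ≤ b1.length) (h2 : 3 ≤ b2.length) :
    horizontal_overlap b1 b2 = altOverlaps b1 b2 := by
  match b1, b2 with
  | x0 :: x1 :: x2 :: t, y0 :: y1 :: y2 :: u =>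
    have ht0 : (0:Int) ≤ (t.length:Int) + 1 + 1 := by positivity
    have hu0 : (0:Int) ≤ (u.length:Int) + 1 + 1 := by positivity
    have ht2 : (2:Int) ≤ (t.length:Int) + 1 + 1 := by omega
    have hu2 : (2:Int) ≤ (u.length:Int) + 1 + 1 := by omega
    simp [horizontal_overlap, altOverlaps, PySem.List.pyGet?, PySem.List.pyIdx?, ht0, hu0, ht2, hu2]
  | [], _ | [_], _ | [_,_], _ => simp at h1
  | _, [] | _, [_] | _, [_,_] => simp at h2

-- every representative index is in range and its box is a member
theorem altReps_append (cs : List (List Int)) (x : List Int) :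
    altReps (cs ++ [x]) =
      (if (altReps cs).any (fun q => altOverlaps x q.2) then altReps cs
       else altReps cs ++ [(cs.length, x)]) := by
  unfold altReps
  rw [show (cs ++ [x]).zipIdx = cs.zipIdx ++ [(x, cs.length)] from by simp [List.zipIdx_append],
      List.foldl_append]
  rfl

theorem altReps_sound (boxes : List (List Int)) :
    ∀ p ∈ altReps boxes, p.1 < boxes.length ∧ p.2 ∈ boxes := by
  induction boxes using List.reverseRecOn with
  | nil => simp [altReps]
  | append_singleton cs x ih =>
    intro p hp
    rw [altReps_append] at hp
    by_cases h : (altReps cs).any (fun q => altOverlaps x q.2)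
    · rw [if_pos h] at hp
      obtain ⟨h1, h2⟩ := ih p hp
      simp only [List.length_append, List.length_cons, List.length_nil]
      exact ⟨by omega, List.mem_append_left _ h2⟩
    · rw [if_neg h] at hp
      rcases List.mem_append.1 hp with hl | hr
      · obtain ⟨h1, h2⟩ := ih p hl
        simp only [List.length_append, List.length_cons, List.length_nil]
        exact ⟨by omega, List.mem_append_left _ h2⟩
      · simp only [List.mem_singleton] at hr
        subst hr
        simp

theorem any_congr_mem {α : Type} (l : List α) (f g : α → Bool)
    (h : ∀ a ∈ l, f a = g a) : l.any f = l.any g := by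
  induction l with
  | nil => rfl
  | cons a t ih =>
    simp only [List.any_cons, h a (by simp)]
    rw [ih (fun b hb => h b (by simp [hb]))]

theorem inner_fold (box : List Int) (out : List (List (List Int)))
    (acc : List (List (List Int))) (b : Bool) :
    out.foldl (fun (acc : List (List (List Int)) × Bool) level =>
        if horizontal_overlap box (level.headD []) then (acc.1 ++ [level ++ [box]], true)
        else (acc.1 ++ [level], acc.2)) (acc, b)
      = (acc ++ out.map (fun level => if horizontal_overlap box (level.headD []) then level ++ [box] else level),
         b || out.any (fun level => horizontal_overlap box (level.headD []))) := by
  induction out generalizing acc b with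
  | nil => simp
  | cons l ls ih =>
    simp only [List.foldl_cons, List.map_cons, List.any_cons]
    by_cases h : horizontal_overlap box (l.headD [])
    · rw [if_pos h, ih]
      simp only [List.headD_eq_head?_getD] at h
      simp [h]
    · rw [if_neg h, ih]
      simp only [List.headD_eq_head?_getD] at h
      simp [h]

theorem find_box_rows_snoc (cs : List (List Int)) (x : List Int) :
    find_box_rows (cs ++ [x]) =
      (if (find_box_rows cs).any (fun level => horizontal_overlap x (level.headD []))
       then (find_box_rows cs).map (fun level => if horizontal_overlap x (level.headD []) then level ++ [x] else level)
       else (find_box_rows cs).map (fun level => if horizontal_overlap x (level.headD []) then level ++ [x] else level) ++ [[x]]) := by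
  unfold find_box_rows
  rw [List.foldl_append]
  simp only [List.foldl_cons, List.foldl_nil, inner_fold, List.nil_append, Bool.false_or]

theorem main_lemma (boxes : List (List Int)) (hp : ∀ b ∈ boxes, 3 ≤ b.length) :
    find_box_rows boxes = find_box_rows_alt boxes := by
  induction boxes using List.reverseRecOn with
  | nil => rfl
  | append_singleton cs x ih =>
    have hpcs : ∀ b ∈ cs, 3 ≤ b.length := fun b hb => hp b (List.mem_append_left _ hb)
    have hx : 3 ≤ x.length := hp x (by simp)
    rw [find_box_rows_snoc, ih hpcs]
    unfold find_box_rows_alt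
    rw [altReps_append]
    have hov : ∀ p ∈ altReps cs,
        horizontal_overlap x ((altRow cs p).headD []) = altOverlaps x p.2 := by
      intro p hpmem
      have hmem := (altReps_sound cs p hpmem).2
      simp only [altRow, List.headD_cons]
      exact overlap_eq x p.2 hx (hpcs p.2 hmem)
    have hany : ((altReps cs).map (altRow cs)).any
          (fun level => horizontal_overlap x (level.headD []))
        = (altReps cs).any (fun q => altOverlaps x q.2) := by
      rw [List.any_map]
      exact any_congr_mem _ _ _ (fun p hpmem => hov p hpmem)
    have hmap : ((altReps cs).map (altRow cs)).map
          (fun level => if horizontal_overlap x (level.headD []) then level ++ [x] else level)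
        = (altReps cs).map (altRow (cs ++ [x])) := by
      rw [List.map_map]
      refine List.map_congr_left (fun p hpmem => ?_)
      obtain ⟨hlt, hmem⟩ := altReps_sound cs p hpmem
      simp only [Function.comp_apply, hov p hpmem]
      by_cases h : altOverlaps x p.2
      · simp [h, altRow, List.drop_append_of_le_length (by omega : p.1 + 1 ≤ cs.length),
             List.filter_append]
      · simp [h, altRow, List.drop_append_of_le_length (by omega : p.1 + 1 ≤ cs.length),
             List.filter_append]
    have hnew : altRow (cs ++ [x]) (cs.length, x) = [x] := by
      simp only [altRow]
      rw [List.drop_eq_nil_of_le (by simp)]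
      rfl
    rw [hany]
    by_cases hfound : (altReps cs).any (fun q => altOverlaps x q.2)
    · simp only [hfound, if_true, hmap]
    · simp only [Bool.not_eq_true] at hfound
      simp only [hfound, Bool.false_eq_true, if_false]
      rw [List.map_append, hmap]
      simp [hnew]

-- ===== VERDICT (by name: the statement is the Claim_ definition above) =====
theorem short_input (boxes : List (List Int)) (h : boxes.length ≤ 1) :
    find_box_rows boxes = find_box_rows_alt boxes := by
  match boxes, h with
  | [], _ => rfl
  | [b], _ => rfl

theorem find_box_rows_spec : Claim_equal_find_box_rows := by
  intro boxes _ hp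
  rcases hp with h | h
  · exact short_input boxes h
  · exact main_lemma boxes h
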